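-- pv_equiv track=rewrite | github.com/BIGbaisha/folktales | regex_fulltext.py | _split_inline_code
-- ===== SOURCE A (Python) =====
-- from typing import Iterable, List, Tuple
--
-- def _split_inline_code(s: str) -> List[Tuple[str, bool]]:
--     parts, buf, in_code = [], [], False
--     i = 0
--     while i < len(s):
--         ch = s[i]
--         if ch == '`':
--             if buf:
--                 parts.append((''.join(buf), in_code)); buf=[]
--             in_code = not in_code
--             parts.append(('`', True))
--             i += 1; continue
--         buf.append(ch); i += 1
--     if buf: parts.append((''.join(buf), in_code))
--     # 合并相邻同类
--     out, cur, flag = [], [], None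
--     for seg, is_code in parts:
--         if flag is None: flag, cur = is_code, [seg]
--         elif is_code == flag: cur.append(seg)
--         else: out.append((''.join(cur), flag)); flag, cur = is_code, [seg]
--     if cur: out.append((''.join(cur), flag))
--     return out
-- ===== SOURCE B (Python) =====
-- from typing import List, Tuple
--
-- def _split_inline_code(s: str) -> List[Tuple[str, bool]]:
--     # One pass: running backtick count gives each char's flag directly;
--     # flush the single buffer whenever the flag changes. No merge pass.
--     out, buf = [], []
--     flag = False
--     count = 0
--     for ch in s:
--         f = True if ch == '`' else (count % 2 == 1)
--         if ch == '`':
--             count += 1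
--         if buf and f != flag:
--             out.append((''.join(buf), flag))
--             buf = []
--         buf.append(ch)
--         flag = f
--     if buf:
--         out.append((''.join(buf), flag))
--     return out
-- ===== Notes on version B (the rewrite author's own statement) =====
-- stated objective: simpler
-- what changed: B replaces A's two-pass scheme (split the string at every backtick into a parts list, then a second merge loop re-joining adjacent same-flag parts) by a single scan that derives each character's flag from a running backtick count and flushes one buffer whenever the flag changes, so the intermediate parts list and the merge pass disappear.
import Mathlib
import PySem

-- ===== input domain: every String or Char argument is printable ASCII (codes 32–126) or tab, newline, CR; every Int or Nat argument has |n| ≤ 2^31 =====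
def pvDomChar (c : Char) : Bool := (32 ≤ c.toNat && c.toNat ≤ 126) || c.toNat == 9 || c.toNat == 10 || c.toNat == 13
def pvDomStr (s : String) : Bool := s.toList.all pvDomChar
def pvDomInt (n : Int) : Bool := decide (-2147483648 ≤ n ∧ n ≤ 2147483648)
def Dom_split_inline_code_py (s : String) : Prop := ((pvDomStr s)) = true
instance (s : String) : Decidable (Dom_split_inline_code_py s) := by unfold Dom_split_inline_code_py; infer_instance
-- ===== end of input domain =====

-- B replaces A's two passes (split at every backtick, then merge adjacent same-flag parts)
-- by a single scan that computes each character's flag from a running backtick count and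
-- flushes one buffer whenever the flag changes; same return value, different decomposition.

-- ===== PORT A =====
-- first pass: state (parts, buf, in_code), scanning the characters
def pvLoop1 : List Char → List (String × Bool) → List Char → Bool → List (String × Bool)
  | [], parts, buf, inc => if buf = [] then parts else parts ++ [(String.ofList buf, inc)]
  | ch :: t, parts, buf, inc =>
    if ch = '`' then
      pvLoop1 t ((if buf = [] then parts else parts ++ [(String.ofList buf, inc)]) ++ [("`", true)]) [] (!inc)
    else
      pvLoop1 t parts (buf ++ [ch]) inc

-- second pass: merge adjacent parts with equal flags; state (out, cur, flag)
def pvMerge : List (String × Bool) → List (String × Bool) → List String → Option Bool → List (String × Bool)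
  | [], out, cur, flag => if cur = [] then out else out ++ [(String.join cur, flag.getD false)]
  | (seg, isc) :: t, out, cur, flag =>
    match flag with
    | none => pvMerge t out [seg] (some isc)
    | some f =>
      if isc = f then pvMerge t out (cur ++ [seg]) (some f)
      else pvMerge t (out ++ [(String.join cur, f)]) [seg] (some isc)

def split_inline_code_py (s : String) : List (String × Bool) :=
  pvMerge (pvLoop1 s.toList [] [] false) [] [] none

-- ===== PORT B =====
-- one pass: state (out, buf, flag, count); flag of a char computed from the running count
def pvLoopB : List Char → List (String × Bool) → List Char → Bool → Nat → List (String × Bool)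
  | [], out, buf, flag, _ => if buf = [] then out else out ++ [(String.ofList buf, flag)]
  | ch :: t, out, buf, flag, count =>
    let f : Bool := if ch = '`' then true else decide (count % 2 = 1)
    let count' := if ch = '`' then count + 1 else count
    if buf ≠ [] ∧ f ≠ flag then
      pvLoopB t (out ++ [(String.ofList buf, flag)]) [ch] f count'
    else
      pvLoopB t out (buf ++ [ch]) f count'

def split_inline_code_py_alt (s : String) : List (String × Bool) :=
  pvLoopB s.toList [] [] false 0

-- ===== PRECONDITION & SPEC =====
def Spec_split_inline_code_py (s : String) (out : List (String × Bool)) : Prop := out = split_inline_code_py_alt s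
instance (s : String) (out : List (String × Bool)) : Decidable (Spec_split_inline_code_py s out) := by unfold Spec_split_inline_code_py; infer_instance

-- ===== CLAIM (what is proved, stated in full; the proofs are below) =====
def Claim_equal_split_inline_code_py : Prop := ∀ (s : String), Dom_split_inline_code_py s → Spec_split_inline_code_py s (split_inline_code_py s)

-- ===== LEMMAS AND PROOFS =====

-- per-character flags: backticks are true, other chars carry the current in-code state
def pvFl : List Char → Bool → List (Char × Bool)
  | [], _ => []
  | ch :: t, inc => (ch, if ch = '`' then true else inc) :: pvFl t (if ch = '`' then !inc else inc)

-- prepend a (possibly empty) constant-flag run onto a chunking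
def pvCC (l : List Char) (fl : Bool) (C : List (List Char × Bool)) : List (List Char × Bool) :=
  if l = [] then C else
    match C with
    | (g, f') :: r => if fl = f' then (l ++ g, fl) :: r else (l, fl) :: (g, f') :: r
    | [] => [(l, fl)]

-- reference result: group adjacent equal flags
def pvChunk : List (Char × Bool) → List (List Char × Bool)
  | [] => []
  | (c, f) :: t => pvCC [c] f (pvChunk t)

def pvRender (C : List (List Char × Bool)) : List (String × Bool) :=
  C.map (fun p => (String.ofList p.1, p.2))

def pvFlat (cur : List String) : List Char := (cur.map String.toList).flatten

theorem pvJoin_eq (cur : List String) : String.join cur = String.ofList (pvFlat cur) := by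
  simp [String.join_eq, pvFlat]

theorem pvCC_CC_same (a b : List Char) (f : Bool) (C : List (List Char × Bool)) :
    pvCC a f (pvCC b f C) = pvCC (a ++ b) f C := by
  rcases C with _ | ⟨⟨g, f'⟩, r⟩ <;>
    by_cases ha : a = [] <;> by_cases hb : b = [] <;>
    simp_all [pvCC] <;> split_ifs <;> simp_all

theorem pvCC_CC_ne (a b : List Char) (f f' : Bool) (C : List (List Char × Bool))
    (ha : a ≠ []) (hb : b ≠ []) (hf : f ≠ f') :
    pvCC a f (pvCC b f' C) = (a, f) :: pvCC b f' C := by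
  rcases C with _ | ⟨⟨g, g'⟩, r⟩ <;> simp_all [pvCC] <;> split_ifs <;> simp_all

theorem pvCC_nil (f : Bool) (C : List (List Char × Bool)) : pvCC [] f C = C := by
  simp [pvCC]

theorem pvCC_cons_ne (a b : List Char) (f f' : Bool) (C : List (List Char × Bool))
    (ha : a ≠ []) (hf : f ≠ f') :
    pvCC a f ((b, f') :: C) = (a, f) :: (b, f') :: C := by
  simp [pvCC, ha, hf]

theorem pvCC_singleton (b : List Char) (f : Bool) (hb : b ≠ []) : pvCC b f [] = [(b, f)] := by
  simp [pvCC, hb]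

theorem pvFlat_append (a b : List String) : pvFlat (a ++ b) = pvFlat a ++ pvFlat b := by
  simp [pvFlat]

theorem pvFlat_single (s : String) : pvFlat [s] = s.toList := by
  simp [pvFlat]

theorem pvParity (n : Nat) : decide ((n + 1) % 2 = 1) = !decide (n % 2 = 1) := by
  rcases Nat.mod_two_eq_zero_or_one n with h | h <;> simp [Nat.add_mod, h]

-- B's loop computes the chunking (nonempty-buffer invariant)
theorem pvLoopB_main (cs : List Char) : ∀ (out : List (String × Bool)) (buf : List Char) (flag : Bool) (count : Nat),
    buf ≠ [] →
    pvLoopB cs out buf flag count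
      = out ++ pvRender (pvCC buf flag (pvChunk (pvFl cs (decide (count % 2 = 1))))) := by
  induction cs with
  | nil =>
    intro out buf flag count hbuf
    simp [pvLoopB, pvFl, pvChunk, pvCC, pvRender, hbuf]
  | cons ch t ih =>
    intro out buf flag count hbuf
    by_cases hch : ch = '`'
    · subst hch
      simp only [pvLoopB, reduceIte]
      by_cases hf : flag = true
      · subst hf
        rw [if_neg (by simp)]
        rw [ih _ _ _ _ (by simp), pvParity]
        simp [pvFl, pvChunk, pvCC_CC_same]
      · replace hf : flag = false := by revert hf; cases flag <;> simp
        subst hf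
        rw [if_pos ⟨hbuf, by simp⟩]
        rw [ih _ _ _ _ (by simp), pvParity]
        simp only [pvFl, reduceIte, pvChunk]
        rw [pvCC_CC_ne buf ['`'] false true _ hbuf (by simp) (by simp)]
        simp [pvRender]
    · by_cases hf : decide (count % 2 = 1) = flag
      · simp only [pvLoopB, if_neg hch]
        rw [if_neg (by simp [hf])]
        rw [ih _ _ _ _ (by simp [hbuf])]
        simp only [pvFl, if_neg hch, pvChunk, hf]
        rw [pvCC_CC_same]
      · simp only [pvLoopB, if_neg hch]
        rw [if_pos ⟨hbuf, by simp [hf]⟩]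
        rw [ih _ _ _ _ (by simp)]
        simp only [pvFl, if_neg hch, pvChunk]
        rw [pvCC_CC_ne buf [ch] flag _ _ hbuf (by simp) (by simp [Ne.symm hf])]
        simp [pvRender]

theorem pvLoopB_empty (cs : List Char) (out : List (String × Bool)) (flag : Bool) (count : Nat) :
    pvLoopB cs out [] flag count
      = out ++ pvRender (pvChunk (pvFl cs (decide (count % 2 = 1)))) := by
  cases cs with
  | nil => simp [pvLoopB, pvFl, pvChunk, pvRender]
  | cons ch t =>
    by_cases hch : ch = '`'
    · subst hch
      simp only [pvLoopB, reduceIte]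
      rw [if_neg (by simp)]
      rw [pvLoopB_main t _ _ _ _ (by simp), pvParity]
      simp [pvFl, pvChunk]
    · simp only [pvLoopB, if_neg hch]
      rw [if_neg (by simp)]
      rw [pvLoopB_main t _ _ _ _ (by simp)]
      simp [pvFl, pvChunk, hch]

-- A's first pass with accumulator pulled out
theorem pvLoop1_append (cs : List Char) : ∀ (parts : List (String × Bool)) (buf : List Char) (inc : Bool),
    pvLoop1 cs parts buf inc = parts ++ pvLoop1 cs [] buf inc := by
  induction cs with
  | nil => intro parts buf inc; by_cases h : buf = [] <;> simp [pvLoop1, h]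
  | cons ch t ih =>
    intro parts buf inc
    by_cases hch : ch = '`'
    · subst hch
      simp only [pvLoop1, reduceIte]
      by_cases h : buf = []
      · rw [if_pos h, if_pos h, ih (parts ++ [("`", true)])]
        simp only [List.nil_append]
        rw [ih ([("`", true)])]
        simp
      · rw [if_neg h, if_neg h, ih ((parts ++ [(String.ofList buf, inc)]) ++ [("`", true)])]
        simp only [List.nil_append]
        rw [ih ([(String.ofList buf, inc)] ++ [("`", true)])]
        simp
    · simp only [pvLoop1, if_neg hch]
      rw [ih]

-- A's merge of A's parts computes the same chunking
theorem pvMerge_main (cs : List Char) : ∀ (inc : Bool) (buf : List Char) (out : List (String × Bool))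
    (cur : List String) (f : Bool), pvFlat cur ≠ [] →
    pvMerge (pvLoop1 cs [] buf inc) out cur (some f)
      = out ++ pvRender (pvCC (pvFlat cur) f (pvCC buf inc (pvChunk (pvFl cs inc)))) := by
  induction cs with
  | nil =>
    intro inc buf out cur f hcur
    have hcurne : cur ≠ [] := by rintro rfl; simp [pvFlat] at hcur
    by_cases h : buf = []
    · subst h
      rw [pvCC_nil]
      simp only [pvLoop1, reduceIte, pvFl, pvChunk, pvMerge]
      rw [if_neg hcurne, pvCC ,if_neg hcur]
      simp [pvJoin_eq, pvRender]
    · simp only [pvLoop1, reduceIte, if_neg h, pvFl, pvChunk, List.nil_append, pvMerge]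
      by_cases hinc : inc = f
      · subst hinc
        rw [if_pos rfl]
        rw [if_neg (by simp [hcurne])]
        rw [pvCC, if_neg h]
        rw [pvCC, if_neg hcur]
        simp [pvJoin_eq, pvRender, pvFlat_append, pvFlat_single]
      · rw [if_neg hinc]
        rw [if_neg (by simp)]
        rw [pvCC_singleton buf inc h]
        rw [pvCC_cons_ne (pvFlat cur) buf f inc [] hcur (fun hh => hinc hh.symm)]
        simp [pvJoin_eq, pvRender, pvFlat_single]
  | cons ch t ih =>
    intro inc buf out cur f hcur
    by_cases hch : ch = '`'
    · subst hch
      simp only [pvLoop1, reduceIte]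
      rw [pvLoop1_append]
      simp only [pvFl, reduceIte, pvChunk]
      by_cases h : buf = []
      · subst h
        rw [pvCC_nil]
        simp only [reduceIte, List.nil_append, List.cons_append]
        cases f
        · simp only [pvMerge, Bool.true_eq_false, reduceIte]
          rw [ih (!inc) [] (out ++ [(String.join cur, false)]) ["`"] true (by simp [pvFlat])]
          rw [pvCC_nil, pvFlat_single]
          rw [pvCC_CC_ne (pvFlat cur) ['`'] false true _ hcur (by simp) (by simp)]
          simp [pvRender, pvJoin_eq]
        · simp only [pvMerge, reduceIte]
          rw [ih (!inc) [] out (cur ++ ["`"]) true (by simp [pvFlat])]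
          rw [pvCC_nil, pvFlat_append, pvFlat_single]
          rw [← pvCC_CC_same]
          simp
      · rw [if_neg h]
        simp only [List.nil_append, List.cons_append, List.append_assoc]
        by_cases hinc : inc = f
        · subst hinc
          simp only [pvMerge, reduceIte]
          cases inc
          · simp only [Bool.true_eq_false, reduceIte, Bool.not_false]
            rw [ih true [] (out ++ [(String.join (cur ++ [String.ofList buf]), false)]) ["`"] true (by simp [pvFlat])]
            rw [pvCC_nil, pvFlat_single]
            rw [pvCC_CC_same (pvFlat cur) buf false]
            rw [pvCC_CC_ne (pvFlat cur ++ buf) ['`'] false true _ (by simp [hcur]) (by simp) (by simp)]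
            simp [pvRender, pvJoin_eq, pvFlat_append, pvFlat_single]
          · simp only [reduceIte, Bool.not_true]
            rw [ih false [] out (cur ++ [String.ofList buf] ++ ["`"]) true (by simp [pvFlat])]
            rw [pvCC_nil]
            rw [pvCC_CC_same buf ['`'] true]
            rw [pvCC_CC_same (pvFlat cur) (buf ++ ['`']) true]
            simp [pvRender, pvJoin_eq, pvFlat_append, pvFlat_single, pvFlat]
        · simp only [pvMerge]
          rw [if_neg hinc]
          cases inc
          · have hf : f = true := by revert hinc; cases f <;> simp
            subst hf
            simp only [Bool.true_eq_false, reduceIte, Bool.not_false]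
            rw [ih true [] (out ++ [(String.join cur, true)] ++ [(String.join [String.ofList buf], false)]) ["`"] true (by simp [pvFlat])]
            rw [pvCC_nil, pvFlat_single]
            rw [pvCC_CC_ne buf ['`'] false true _ h (by simp) (by simp)]
            rw [pvCC_cons_ne (pvFlat cur) buf true false _ hcur (by simp)]
            simp [pvRender, pvJoin_eq, pvFlat_single]
          · have hf : f = false := by revert hinc; cases f <;> simp
            subst hf
            simp only [reduceIte, Bool.not_true]
            rw [ih false [] (out ++ [(String.join cur, false)]) ([String.ofList buf] ++ ["`"]) true (by simp [pvFlat])]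
            rw [pvCC_nil]
            rw [pvCC_CC_same buf ['`'] true]
            rw [pvCC_CC_ne (pvFlat cur) (buf ++ ['`']) false true _ hcur (by simp [h]) (by simp)]
            simp [pvRender, pvJoin_eq, pvFlat_append, pvFlat_single, pvFlat]
    · simp only [pvLoop1, if_neg hch]
      rw [ih inc (buf ++ [ch]) out cur f hcur]
      simp only [pvFl, if_neg hch, pvChunk]
      rw [pvCC_CC_same]

theorem pvMerge_none (cs : List Char) : ∀ (inc : Bool) (buf : List Char) (out : List (String × Bool)),
    pvMerge (pvLoop1 cs [] buf inc) out [] none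
      = out ++ pvRender (pvCC buf inc (pvChunk (pvFl cs inc))) := by
  induction cs with
  | nil =>
    intro inc buf out
    by_cases h : buf = []
    · subst h
      simp [pvLoop1, pvMerge, pvFl, pvChunk, pvCC, pvRender]
    · simp only [pvLoop1, reduceIte, if_neg h, List.nil_append, pvMerge, pvFl, pvChunk]
      rw [pvCC, if_neg h]
      simp [pvJoin_eq, pvRender, pvFlat_single, pvMerge]
  | cons ch t ih =>
    intro inc buf out
    by_cases hch : ch = '`'
    · subst hch
      simp only [pvLoop1, reduceIte]
      rw [pvLoop1_append]
      simp only [pvFl, reduceIte, pvChunk]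
      by_cases h : buf = []
      · subst h
        rw [pvCC_nil]
        simp only [reduceIte, List.nil_append, List.cons_append]
        simp only [pvMerge]
        rw [pvMerge_main t (!inc) [] out ["`"] true (by simp [pvFlat])]
        rw [pvCC_nil, pvFlat_single]
        simp
      · rw [if_neg h]
        simp only [List.nil_append, List.cons_append, List.append_assoc, pvMerge]
        cases inc
        · simp only [Bool.true_eq_false, reduceIte, Bool.not_false]
          rw [pvMerge_main t true [] (out ++ [(String.join [String.ofList buf], false)]) ["`"] true (by simp [pvFlat])]
          rw [pvCC_nil, pvFlat_single]
          rw [pvCC_CC_ne buf ['`'] false true _ h (by simp) (by simp)]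
          simp [pvRender, pvJoin_eq, pvFlat_single]
        · simp only [reduceIte, Bool.not_true]
          rw [pvMerge_main t false [] out [String.ofList buf, "`"] true (by simp [pvFlat])]
          rw [pvCC_nil]
          rw [pvCC_CC_same buf ['`'] true]
          simp [pvRender, pvJoin_eq, pvFlat_append, pvFlat_single, pvFlat]
    · simp only [pvLoop1, if_neg hch]
      rw [ih inc (buf ++ [ch]) out]
      simp only [pvFl, if_neg hch, pvChunk]
      rw [pvCC_CC_same]

-- ===== VERDICT (by name: the statement is the Claim_ definition above) =====
theorem split_inline_code_py_spec : Claim_equal_split_inline_code_py := by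
  intro s _
  unfold Spec_split_inline_code_py split_inline_code_py split_inline_code_py_alt
  rw [pvMerge_none, pvLoopB_empty]
  simp [pvCC]
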